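-- pv_equiv track=rewrite | github.com/jonathonreilly/toy-physics | scripts/generated_dag_pattern_mobility.py | evolve_on_graph
-- ===== SOURCE A (Python) =====
-- from collections import defaultdict
--
-- def evolve_on_graph(
--     n_nodes: int,
--     neighbors: dict[int, list[int]],
--     seed: frozenset[int],
--     survive: frozenset[int],
--     birth: frozenset[int],
--     steps: int,
-- ) -> list[frozenset[int]]:
--     """Run CA rule on arbitrary graph with given neighbor structure."""
--     active = set(seed)
--     history = []
--
--     for _ in range(steps):
--         history.append(frozenset(active))
--         counts: dict[int, int] = defaultdict(int)
--         for node in active: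
--             for nb in neighbors.get(node, []):
--                 counts[nb] += 1
--
--         new_active = set()
--         # Check all nodes that are active or adjacent to active
--         candidates = set(active)
--         for node in active:
--             candidates.update(neighbors.get(node, []))
--
--         for node in candidates:
--             c = counts.get(node, 0)
--             if node in active and c in survive:
--                 new_active.add(node)
--             elif node not in active and c in birth:
--                 new_active.add(node)
--
--         active = new_active
--
--     return history
-- ===== SOURCE B (Python) =====
-- def evolve_on_graph(n_nodes, neighbors, seed, survive, birth, steps):
--     """CA on a graph via the transposed adjacency: the reverse index rev is
--     built once up front, and each step gathers a node's active-neighbour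
--     count on demand by testing rev[node] against the active set — no
--     per-step count dict and no candidates set; the next generation is the
--     union of a survivors pass over the active set and a births pass over
--     the frontier of non-active neighbours."""
--     rev = {}
--     for u, nbs in neighbors.items():
--         for v in nbs:
--             rev.setdefault(v, []).append(u)
--     def cnt(v, active):
--         return sum(1 for u in rev.get(v, []) if u in active)
--     history = []
--     active = set(seed)
--     for _ in range(steps):
--         history.append(frozenset(active))
--         frontier = {v for u in active for v in neighbors.get(u, []) if v not in active}
--         active = ({v for v in active if cnt(v, active) in survive}
--                   | {v for v in frontier if cnt(v, active) in birth})
--     return history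
-- ===== Notes on version B (the rewrite author's own statement) =====
-- stated objective: alternative
-- what changed: B precomputes the transposed adjacency (reverse index) once and replaces A's per-step scatter count dict and candidates set with on-demand gather counting (membership tests of a node's reverse-neighbour list against the active set), computing the next generation directly as the union of a survivors pass over the active set and a births pass over the frontier of non-active neighbours.
import Mathlib
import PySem

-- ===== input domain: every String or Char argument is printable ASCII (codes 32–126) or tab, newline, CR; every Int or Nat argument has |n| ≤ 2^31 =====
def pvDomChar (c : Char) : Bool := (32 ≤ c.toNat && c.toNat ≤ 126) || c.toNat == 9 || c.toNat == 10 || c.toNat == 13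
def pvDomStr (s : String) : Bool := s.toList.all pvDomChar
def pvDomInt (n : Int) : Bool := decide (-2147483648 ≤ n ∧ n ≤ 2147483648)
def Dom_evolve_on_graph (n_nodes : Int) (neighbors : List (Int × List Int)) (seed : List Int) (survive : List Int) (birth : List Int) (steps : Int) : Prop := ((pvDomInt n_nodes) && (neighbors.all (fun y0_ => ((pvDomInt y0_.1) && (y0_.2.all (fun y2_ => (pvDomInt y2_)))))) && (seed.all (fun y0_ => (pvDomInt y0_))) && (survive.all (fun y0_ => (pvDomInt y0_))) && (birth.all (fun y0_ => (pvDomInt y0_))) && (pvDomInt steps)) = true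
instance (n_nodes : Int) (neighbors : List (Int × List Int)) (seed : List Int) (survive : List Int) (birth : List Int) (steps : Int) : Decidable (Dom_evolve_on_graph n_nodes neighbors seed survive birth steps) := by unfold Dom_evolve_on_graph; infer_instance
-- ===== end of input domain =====

-- B precomputes the transposed adjacency once and gathers each node's
-- active-neighbour count on demand (no per-step count dict, no candidates set);
-- next generation = survivors pass over active ∪ births pass over the frontier
-- (objective: alternative, not claimed faster).

-- ===== PORT A =====
-- neighbors.get(node, [])
def pvNb (neighbors : List (Int × List Int)) (node : Int) : List Int :=
  (PySem.Dict.mk neighbors).getD node []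

-- one iteration of A's 'for _ in range(steps)' body (history handled by the loop)
def pvStepA (neighbors : List (Int × List Int)) (survive birth : List Int) (active : List Int) : List Int :=
  let counts : PySem.Dict Int Int :=
    active.foldl (fun d node => (pvNb neighbors node).foldl (fun d nb => d.modify nb 0 (· + 1)) d) PySem.Dict.empty
  let candidates : PySem.Set Int :=
    active.foldl (fun c node => PySem.Set.update c (pvNb neighbors node)) (PySem.Set.ofList active)
  candidates.foldl (fun s node =>
    if node ∈ active ∧ counts.getD node 0 ∈ survive then PySem.Set.add s node
    else if node ∉ active ∧ counts.getD node 0 ∈ birth then PySem.Set.add s node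
    else s) PySem.Set.empty

def pvLoopA (neighbors : List (Int × List Int)) (survive birth : List Int) :
    Nat → List Int → List (List Int) → List (List Int)
  | 0, _, history => history
  | n + 1, active, history =>
      pvLoopA neighbors survive birth n (pvStepA neighbors survive birth active) (history ++ [active])

def evolve_on_graph (n_nodes : Int) (neighbors : List (Int × List Int)) (seed : List Int) (survive : List Int) (birth : List Int) (steps : Int) : List (List Int) :=
  pvLoopA neighbors survive birth steps.toNat (PySem.Set.ofList seed) []

-- ===== PORT B =====
-- the reverse index: for u, nbs in neighbors.items(): for v in nbs: rev.setdefault(v, []).append(u)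
-- (iterating the assoc list is exact for the dict's items() since Pre_ makes its keys unique)
def pvRev (neighbors : List (Int × List Int)) : PySem.Dict Int (List Int) :=
  neighbors.foldl (fun r p => p.2.foldl (fun r v => r.modify v [] (· ++ [p.1])) r) PySem.Dict.empty

-- cnt(v, active) = sum(1 for u in rev.get(v, []) if u in active)
def pvCnt (rev : PySem.Dict Int (List Int)) (active : List Int) (v : Int) : Int :=
  (rev.getD v []).foldl (fun acc u => if u ∈ active then acc + 1 else acc) 0

-- one iteration of B's loop body
def pvStepB (neighbors : List (Int × List Int)) (rev : PySem.Dict Int (List Int))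
    (survive birth : List Int) (active : List Int) : List Int :=
  let frontier : PySem.Set Int :=
    PySem.Set.ofList ((active.flatMap (fun u => pvNb neighbors u)).filter (fun v => decide (v ∉ active)))
  let survivors : PySem.Set Int :=
    PySem.Set.ofList (active.filter (fun v => decide (pvCnt rev active v ∈ survive)))
  let births : PySem.Set Int :=
    PySem.Set.ofList (frontier.filter (fun v => decide (pvCnt rev active v ∈ birth)))
  PySem.Set.union survivors births

def pvLoopB (neighbors : List (Int × List Int)) (rev : PySem.Dict Int (List Int)) (survive birth : List Int) :
    Nat → List Int → List (List Int) → List (List Int)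
  | 0, _, history => history
  | n + 1, active, history =>
      pvLoopB neighbors rev survive birth n (pvStepB neighbors rev survive birth active) (history ++ [active])

def evolve_on_graph_alt (n_nodes : Int) (neighbors : List (Int × List Int)) (seed : List Int) (survive : List Int) (birth : List Int) (steps : Int) : List (List Int) :=
  pvLoopB neighbors (pvRev neighbors) survive birth steps.toNat (PySem.Set.ofList seed) []

-- ===== PRECONDITION & SPEC =====
-- Pre_ excludes assoc lists with duplicate keys in `neighbors`: they cannot arise from
-- A's dict[int, list[int]] parameter, and on them the assoc-list encoding of a dict is
-- ambiguous (first-match vs last-wins), so neither port's reading is the specified one.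
def Pre_evolve_on_graph (n_nodes : Int) (neighbors : List (Int × List Int)) (seed : List Int) (survive : List Int) (birth : List Int) (steps : Int) : Prop :=
  (neighbors.map Prod.fst).Nodup
instance (n_nodes : Int) (neighbors : List (Int × List Int)) (seed : List Int) (survive : List Int) (birth : List Int) (steps : Int) : Decidable (Pre_evolve_on_graph n_nodes neighbors seed survive birth steps) := by unfold Pre_evolve_on_graph; infer_instance

def pvWitness_evolve_on_graph : Int × (List (Int × List Int)) × List Int × List Int × List Int × Int :=
  (3, [(0, [1]), (1, [0, 2]), (2, [1])], [0, 1], [1], [2], 2)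

def Spec_evolve_on_graph (n_nodes : Int) (neighbors : List (Int × List Int)) (seed : List Int) (survive : List Int) (birth : List Int) (steps : Int) (out : List (List Int)) : Prop := out = evolve_on_graph_alt n_nodes neighbors seed survive birth steps
instance (n_nodes : Int) (neighbors : List (Int × List Int)) (seed : List Int) (survive : List Int) (birth : List Int) (steps : Int) (out : List (List Int)) : Decidable (Spec_evolve_on_graph n_nodes neighbors seed survive birth steps out) := by unfold Spec_evolve_on_graph; infer_instance

-- ===== CLAIM (what is proved, stated in full; the proofs are below) =====
def Claim_equal_evolve_on_graph : Prop := ∀ (n_nodes : Int) (neighbors : List (Int × List Int)) (seed : List Int) (survive : List Int) (birth : List Int) (steps : Int), Dom_evolve_on_graph n_nodes neighbors seed survive birth steps → Pre_evolve_on_graph n_nodes neighbors seed survive birth steps → Spec_evolve_on_graph n_nodes neighbors seed survive birth steps (evolve_on_graph n_nodes neighbors seed survive birth steps)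

-- ===== LEMMAS AND PROOFS =====

theorem foldl_add_if (p : Int → Bool) :
    ∀ (l s : List Int), l.Nodup → (∀ x ∈ l, x ∉ s) →
      l.foldl (fun s x => if p x then PySem.Set.add s x else s) s = s ++ l.filter p
  | [], s, _, _ => by simp
  | x :: xs, s, hnd, hdisj => by
    simp only [List.foldl_cons]
    cases hp : p x with
    | false =>
        rw [if_neg Bool.false_ne_true,
            foldl_add_if p xs s (List.Nodup.of_cons hnd) (fun y hy => hdisj y (List.mem_cons_of_mem _ hy))]
        simp [hp]
    | true =>
        rw [if_pos rfl, PySem.Set.add_of_not_mem (hdisj x (List.mem_cons_self)),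
            foldl_add_if p xs (s ++ [x]) (List.Nodup.of_cons hnd)]
        · simp [hp]
        · intro y hy
          simp only [List.mem_append, List.mem_singleton]
          rintro (h | rfl)
          · exact hdisj y (List.mem_cons_of_mem _ hy) h
          · exact (List.nodup_cons.mp hnd).1 hy

theorem fold_update_eq (n : Int → List Int) :
    ∀ (l : List Int) (c : PySem.Set Int),
      l.foldl (fun c node => PySem.Set.update c (n node)) c = PySem.Set.update c (l.flatMap n)
  | [], c => by simp [PySem.Set.update]
  | x :: xs, c => by
    simp only [List.foldl_cons, List.flatMap_cons]
    rw [fold_update_eq n xs, PySem.Set.update_append]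

-- set(xs) commutes with a pure filter: set([x for x in l if p x]) = {x in set(l) : p x}
theorem ofList_filter_comm (p : Int → Bool) :
    ∀ (l s : List Int), (l.filter p).foldl PySem.Set.add (s.filter p) = (l.foldl PySem.Set.add s).filter p
  | [], s => by simp
  | x :: xs, s => by
    cases hp : p x with
    | false =>
        have hxf : (PySem.Set.add s x).filter p = s.filter p := by
          unfold PySem.Set.add
          split <;> simp [hp]
        simp only [List.filter_cons, hp, List.foldl_cons]
        rw [if_neg (by simp), ← hxf, ofList_filter_comm p xs (PySem.Set.add s x)]
    | true =>
        have hadd : (PySem.Set.add s x).filter p = PySem.Set.add (s.filter p) x := by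
          unfold PySem.Set.add PySem.Set.contains
          have hc : (s.filter p).contains x = s.contains x := by
            by_cases hx : x ∈ s <;>
              simp [List.contains_eq_mem, List.mem_filter, hx, hp]
          rw [hc]
          split <;> simp [hp]
        simp only [List.filter_cons, hp, List.foldl_cons]
        rw [if_pos trivial, List.foldl_cons, ← hadd, ofList_filter_comm p xs (PySem.Set.add s x)]

theorem ofList_filter (p : Int → Bool) (l : List Int) :
    PySem.Set.ofList (l.filter p) = (PySem.Set.ofList l).filter p := by
  rw [PySem.Set.ofList_eq_foldl, PySem.Set.ofList_eq_foldl]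
  simpa using ofList_filter_comm p l []

-- rev.get(v, []) = the sources u, in items order and with multiplicity, with v in neighbors[u]
theorem rev_getD (neighbors : List (Int × List Int)) (v : Int) :
    (pvRev neighbors).getD v []
      = ((neighbors.flatMap (fun p => p.2.map (fun w => (w, p.1)))).filter (fun q => q.1 == v)).map (·.2) := by
  unfold pvRev
  have hinner : ∀ (p : Int × List Int) (r : PySem.Dict Int (List Int)),
      p.2.foldl (fun r v => r.modify v [] (· ++ [p.1])) r
        = (p.2.map (fun w => (w, p.1))).foldl (fun r q => r.modify q.1 [] (· ++ [q.2])) r := by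
    intro p r
    rw [List.foldl_map]
  rw [PySem.List.foldl_congr_mem neighbors _
        (fun r p => (p.2.map (fun w => (w, p.1))).foldl (fun r q => r.modify q.1 [] (· ++ [q.2])) r)
        PySem.Dict.empty (fun r p _ => hinner p r)]
  rw [← List.foldl_flatMap, PySem.Dict.getD_foldl_modify_append]
  simp

-- at most one entry per key: the key-indexed sum collapses to the dict lookup
theorem sum_key_pick (v a : Int) :
    ∀ (neighbors : List (Int × List Int)), (neighbors.map Prod.fst).Nodup →
      (neighbors.map (fun p => if p.1 = a then p.2.count v else 0)).sum = (pvNb neighbors a).count v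
  | [], _ => by simp [pvNb, PySem.Dict.getD_eq_get?_getD, PySem.Dict.get?]
  | (k, ns) :: rest, hnd => by
    have hnd' : (rest.map Prod.fst).Nodup := (List.nodup_cons.mp hnd).2
    by_cases hk : k = a
    · subst hk
      have hzero : (rest.map (fun p => if p.1 = k then p.2.count v else 0)).sum = 0 := by
        apply List.sum_eq_zero
        intro x hx
        obtain ⟨p, hp, rfl⟩ := List.mem_map.mp hx
        have : p.1 ≠ k := by
          intro h
          exact (List.nodup_cons.mp hnd).1 (List.mem_map.mpr ⟨p, hp, h⟩)
        simp [this]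
      simp only [List.map_cons, List.sum_cons, if_pos rfl, hzero]
      rw [pvNb, PySem.Dict.getD_eq_get?_getD, PySem.Dict.get?_mk_cons]
      simp
    · simp only [List.map_cons, List.sum_cons, if_neg hk, Nat.zero_add]
      rw [sum_key_pick v a rest hnd', pvNb, pvNb,
          PySem.Dict.getD_eq_get?_getD, PySem.Dict.getD_eq_get?_getD, PySem.Dict.get?_mk_cons]
      simp [show (k == a) = false by simp [hk]]

-- double-sum swap: summing per dict entry over active equals summing per active node
theorem sum_swap (v : Int) (neighbors : List (Int × List Int)) (hk : (neighbors.map Prod.fst).Nodup) :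
    ∀ (active : List Int), active.Nodup →
      (neighbors.map (fun p => if p.1 ∈ active then p.2.count v else 0)).sum
        = (active.map (fun a => (pvNb neighbors a).count v)).sum
  | [], _ => by simp
  | a :: rest, hnd => by
    have ha : a ∉ rest := (List.nodup_cons.mp hnd).1
    have hsplit : ∀ p : Int × List Int,
        (if p.1 ∈ a :: rest then p.2.count v else 0)
          = (if p.1 = a then p.2.count v else 0) + (if p.1 ∈ rest then p.2.count v else 0) := by
      intro p
      by_cases h1 : p.1 = a
      · subst h1
        simp [ha]
      · by_cases h2 : p.1 ∈ rest <;> simp [h1, h2]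
    calc (neighbors.map (fun p => if p.1 ∈ a :: rest then p.2.count v else 0)).sum
        = (neighbors.map (fun p => (if p.1 = a then p.2.count v else 0) + (if p.1 ∈ rest then p.2.count v else 0))).sum := by
          rw [List.map_congr_left (fun p _ => hsplit p)]
      _ = (neighbors.map (fun p => if p.1 = a then p.2.count v else 0)).sum
            + (neighbors.map (fun p => if p.1 ∈ rest then p.2.count v else 0)).sum := by
          rw [← List.sum_map_add]
      _ = (pvNb neighbors a).count v + ((rest.map (fun a => (pvNb neighbors a).count v)).sum) := by
          rw [sum_key_pick v a neighbors hk, sum_swap v neighbors hk rest (List.Nodup.of_cons hnd)]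
      _ = ((a :: rest).map (fun a => (pvNb neighbors a).count v)).sum := by simp

-- gather count (B) = scatter count (A): cnt(v, active) is the multiplicity of v
-- among the neighbours of the active nodes
theorem cnt_eq (neighbors : List (Int × List Int)) (hk : (neighbors.map Prod.fst).Nodup)
    (active : List Int) (hA : active.Nodup) (v : Int) :
    pvCnt (pvRev neighbors) active v = ((active.flatMap (fun u => pvNb neighbors u)).count v : Int) := by
  unfold pvCnt
  rw [PySem.List.foldl_ite_add_one, rev_getD, List.count_flatMap]
  have : List.countP (fun u => decide (u ∈ active))
        (((neighbors.flatMap (fun p => p.2.map (fun w => (w, p.1)))).filter (fun q => q.1 == v)).map (·.2))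
      = (neighbors.map (fun p => if p.1 ∈ active then p.2.count v else 0)).sum := by
    rw [List.countP_map, List.countP_filter, List.countP_flatMap]
    congr 1
    apply List.map_congr_left
    intro p _
    simp only [Function.comp]
    rw [List.countP_map]
    by_cases hp : p.1 ∈ active
    · simp [Function.comp_def, hp, List.count_eq_countP]
    · simp [Function.comp_def, hp]
  rw [this, sum_swap v neighbors hk active hA]
  push_cast
  simp [Function.comp_def, pvNb]

theorem step_eq (neighbors : List (Int × List Int)) (hk : (neighbors.map Prod.fst).Nodup)
    (survive birth : List Int) (active : List Int) (hA : active.Nodup) :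
    pvStepA neighbors survive birth active = pvStepB neighbors (pvRev neighbors) survive birth active := by
  unfold pvStepA pvStepB
  simp only []
  rw [← List.foldl_flatMap, ← PySem.Dict.counter_eq_foldl]
  set allN := active.flatMap (fun node => pvNb neighbors node) with hallN
  set cnt := PySem.Dict.counter allN with hcnt
  rw [fold_update_eq]
  rw [PySem.Set.ofList_eq_self_of_nodup active hA]
  rw [PySem.Set.update_eq_append_filter]
  rw [List.foldl_append]
  set kNA := (PySem.Set.ofList allN).filter (fun y => !(PySem.Set.contains active y)) with hkNA
  -- A, segment 1: over active
  rw [PySem.List.foldl_congr_mem active _ (fun s x => if (decide (cnt.getD x 0 ∈ survive)) then PySem.Set.add s x else s) PySem.Set.empty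
        (fun acc x hx => by simp [hx])]
  rw [foldl_add_if _ active PySem.Set.empty hA (by intro x hx; simp [PySem.Set.empty])]
  -- A, segment 2: over kNA
  have hkmem : ∀ x ∈ kNA, x ∉ active := by
    intro x hx
    have := (List.mem_filter.mp hx).2
    simpa using this
  rw [PySem.List.foldl_congr_mem kNA _ (fun s x => if (decide (cnt.getD x 0 ∈ birth)) then PySem.Set.add s x else s) _
        (fun acc x hx => by simp [hkmem x hx])]
  have hknd : kNA.Nodup := (PySem.Set.nodup_ofList _).filter _
  rw [foldl_add_if _ kNA _ hknd (by
    intro x hx hmem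
    simp only [PySem.Set.empty, List.nil_append, List.mem_filter] at hmem
    exact hkmem x hx hmem.1)]
  -- B: frontier = kNA
  have hfront : PySem.Set.ofList (allN.filter (fun v => decide (v ∉ active))) = kNA := by
    rw [ofList_filter, hkNA]
    apply List.filter_congr
    intro a _
    simp [PySem.Set.contains]
  rw [hfront]
  -- B: survivors and births are already duplicate-free
  have hsnd : (active.filter (fun v => decide (pvCnt (pvRev neighbors) active v ∈ survive))).Nodup := hA.filter _
  rw [PySem.Set.ofList_eq_self_of_nodup _ hsnd]
  have hknd' : (kNA.filter (fun v => decide (pvCnt (pvRev neighbors) active v ∈ birth))).Nodup := hknd.filter _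
  rw [PySem.Set.ofList_eq_self_of_nodup _ hknd']
  -- union of disjoint survivors/births is append
  rw [PySem.Set.union, PySem.Set.update_eq_append_of_disjoint _ _ hknd' (by
    intro x hx hmem
    exact hkmem x (List.mem_of_mem_filter hx) (List.mem_of_mem_filter hmem))]
  simp only [PySem.Set.empty, List.nil_append]
  -- the two counts agree pointwise
  have hcnts : ∀ v, cnt.getD v 0 = pvCnt (pvRev neighbors) active v := by
    intro v
    rw [hcnt, PySem.Dict.getD_counter, cnt_eq neighbors hk active hA v]
  congr 1
  · exact List.filter_congr (fun a _ => by rw [hcnts])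
  · exact List.filter_congr (fun a _ => by rw [hcnts])

theorem step_nodup (neighbors : List (Int × List Int)) (rev : PySem.Dict Int (List Int))
    (survive birth : List Int) (active : List Int) :
    (pvStepB neighbors rev survive birth active).Nodup := by
  unfold pvStepB
  exact PySem.Set.nodup_union _ _ (PySem.Set.nodup_ofList _)

theorem loop_eq (neighbors : List (Int × List Int)) (hk : (neighbors.map Prod.fst).Nodup)
    (survive birth : List Int) (n : Nat) (active : List Int) (history : List (List Int)) (hA : active.Nodup) :
    pvLoopA neighbors survive birth n active history
      = pvLoopB neighbors (pvRev neighbors) survive birth n active history := by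
  induction n generalizing active history with
  | zero => rfl
  | succ n ih =>
      simp only [pvLoopA, pvLoopB, step_eq neighbors hk survive birth active hA]
      exact ih _ _ (step_nodup neighbors (pvRev neighbors) survive birth active)

-- ===== VERDICT (by name: the statement is the Claim_ definition above) =====
theorem evolve_on_graph_spec : Claim_equal_evolve_on_graph := by
  intro n_nodes neighbors seed survive birth steps _ hpre
  unfold Spec_evolve_on_graph evolve_on_graph evolve_on_graph_alt
  exact loop_eq neighbors hpre survive birth steps.toNat _ [] (PySem.Set.nodup_ofList seed)
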